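-- pv_equiv track=rewrite | github.com/stallam101/NVSim | sierpinski_4_variants.py | analyze_transition
-- ===== SOURCE A (Python) =====
-- from typing import Dict, Optional, Tuple, List
--
-- def analyze_transition(cw0: int, cw1: int) -> Dict[str, int]:
--     """Analyze bit transitions between two codewords"""
--     set_transitions = 0
--     reset_transitions = 0
--     redundant_ops = 0
--
--     for i in range(21):
--         bit_mask = 1 << i
--         cw0_bit = (cw0 & bit_mask) >> i
--         cw1_bit = (cw1 & bit_mask) >> i
--
--         if cw0_bit == 0 and cw1_bit == 1:
--             set_transitions += 1
--         elif cw0_bit == 1 and cw1_bit == 0: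
--             reset_transitions += 1
--         else:
--             redundant_ops += 1
--
--     return {
--         'set_transitions': set_transitions,
--         'reset_transitions': reset_transitions,
--         'redundant_ops': redundant_ops,
--         'total_bits': 21
--     }
-- ===== SOURCE B (Python) =====
-- def analyze_transition(cw0: int, cw1: int) -> dict:
--     """Analyze bit transitions between two codewords (bit-parallel popcounts)."""
--     mask = (1 << 21) - 1
--     x0 = cw0 & mask
--     x1 = cw1 & mask
--     set_transitions = ((x0 ^ mask) & x1).bit_count()
--     reset_transitions = (x0 & (x1 ^ mask)).bit_count()
--     return {
--         'set_transitions': set_transitions,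
--         'reset_transitions': reset_transitions,
--         'redundant_ops': 21 - set_transitions - reset_transitions,
--         'total_bits': 21
--     }
-- ===== Notes on version B (the rewrite author's own statement) =====
-- stated objective: idiomatic
-- what changed: Replaced the 21-iteration per-bit classification loop with three bit-parallel masked popcounts: set = popcount(~cw0 & cw1 & mask), reset = popcount(cw0 & ~cw1 & mask), redundant = 21 - set - reset.
import Mathlib
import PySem

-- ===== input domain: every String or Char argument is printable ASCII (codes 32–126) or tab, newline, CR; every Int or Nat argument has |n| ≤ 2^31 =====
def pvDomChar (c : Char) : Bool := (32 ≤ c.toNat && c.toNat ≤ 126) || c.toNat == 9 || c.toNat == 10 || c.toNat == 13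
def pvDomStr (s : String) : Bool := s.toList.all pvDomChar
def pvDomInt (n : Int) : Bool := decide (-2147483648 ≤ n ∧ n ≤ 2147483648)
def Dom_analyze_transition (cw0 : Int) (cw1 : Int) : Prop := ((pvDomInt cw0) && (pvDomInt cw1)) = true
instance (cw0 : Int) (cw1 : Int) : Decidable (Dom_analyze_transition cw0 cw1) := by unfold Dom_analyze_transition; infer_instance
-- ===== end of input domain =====

-- B replaces A's 21-iteration per-bit classification loop by bit-parallel masked
-- popcounts (objective: idiomatic / alternative algorithm; same return value).

-- ===== PORT A =====
-- the body of A's `for i in range(21)` loop, as a fold step over the state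
-- (set_transitions, reset_transitions, redundant_ops)
def stepA (cw0 : Int) (cw1 : Int) (acc : Int × Int × Int) (i : Int) : Int × Int × Int :=
  let bit_mask : Int := (1 : Int) <<< i.toNat
  let cw0_bit : Int := (PySem.Int.band cw0 bit_mask) >>> i.toNat
  let cw1_bit : Int := (PySem.Int.band cw1 bit_mask) >>> i.toNat
  if cw0_bit = 0 ∧ cw1_bit = 1 then (acc.1 + 1, acc.2.1, acc.2.2)
  else if cw0_bit = 1 ∧ cw1_bit = 0 then (acc.1, acc.2.1 + 1, acc.2.2)
  else (acc.1, acc.2.1, acc.2.2 + 1)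

def analyze_transition (cw0 : Int) (cw1 : Int) : List (String × Int) :=
  let r := (PySem.List.pyRange 0 21 1).foldl (stepA cw0 cw1) (0, 0, 0)
  [("set_transitions", r.1), ("reset_transitions", r.2.1),
   ("redundant_ops", r.2.2), ("total_bits", 21)]

-- ===== PORT B =====
def analyze_transition_alt (cw0 : Int) (cw1 : Int) : List (String × Int) :=
  let mask : Int := ((1 : Int) <<< (21 : Nat)) - 1
  let x0 : Int := PySem.Int.band cw0 mask
  let x1 : Int := PySem.Int.band cw1 mask
  let s : Int := PySem.Int.bitCount (PySem.Int.band (PySem.Int.bxor x0 mask) x1)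
  let t : Int := PySem.Int.bitCount (PySem.Int.band x0 (PySem.Int.bxor x1 mask))
  [("set_transitions", s), ("reset_transitions", t),
   ("redundant_ops", 21 - s - t), ("total_bits", 21)]

-- ===== PRECONDITION & SPEC =====
def Spec_analyze_transition (cw0 : Int) (cw1 : Int) (out : List (String × Int)) : Prop := out = analyze_transition_alt cw0 cw1
instance (cw0 : Int) (cw1 : Int) (out : List (String × Int)) : Decidable (Spec_analyze_transition cw0 cw1 out) := by unfold Spec_analyze_transition; infer_instance

-- ===== CLAIM (what is proved, stated in full; the proofs are below) =====
def Claim_equal_analyze_transition : Prop := ∀ (cw0 : Int) (cw1 : Int), Dom_analyze_transition cw0 cw1 → Spec_analyze_transition cw0 cw1 (analyze_transition cw0 cw1)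

-- ===== LEMMAS AND PROOFS =====

-- Python's `x & (2^k - 1)` is `x mod 2^k`, also for negative x
theorem band_mask_eq_emod (x : Int) (k : Nat) :
    PySem.Int.band x (2 ^ k - 1) = x % (2 ^ k) := by
  have hpk : (0:Int) < 2 ^ k := by positivity
  have hcast : ((2:Int) ^ k) = ((2 ^ k : Nat) : Int) := by push_cast; ring
  have h1 : ((2:Int) ^ k - 1).toNat = 2 ^ k - 1 := by omega
  by_cases hx : 0 ≤ x
  · rw [PySem.Int.band_of_nonneg hx (by omega)]
    rw [h1, Nat.and_two_pow_sub_one_eq_mod]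
    have hx' : x = (x.toNat : Int) := by omega
    rw [hx']; push_cast; rfl
  · rw [PySem.Int.band_comm, PySem.Int.band, if_pos (by omega : (0:Int) ≤ 2 ^ k - 1), if_neg hx,
      h1, Nat.and_comm, Nat.and_two_pow_sub_one_eq_mod]
    set n : Nat := (-x - 1).toNat with hn
    have hxn : x = -(n : Int) - 1 := by omega
    have hdm : 2 ^ k * (n / 2 ^ k) + n % 2 ^ k = n := Nat.div_add_mod n (2 ^ k)
    have hrlt : n % 2 ^ k < 2 ^ k := Nat.mod_lt _ (by positivity)
    have hx2 : x = (2 ^ k - ((n % 2 ^ k : Nat) : Int) - 1) + 2 ^ k * (-((n / 2 ^ k : Nat) : Int) - 1) := by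
      have : ((n : Int)) = 2 ^ k * ((n / 2 ^ k : Nat) : Int) + ((n % 2 ^ k : Nat) : Int) := by
        rw [hcast]; exact_mod_cast hdm.symm
      rw [hxn, this]; ring
    have hmod : x % 2 ^ k = 2 ^ k - ((n % 2 ^ k : Nat) : Int) - 1 := by
      rw [hx2, Int.add_mul_emod_self_left, Int.emod_eq_of_lt (by omega) (by omega)]
    rw [hmod]
    omega

-- Python's `x & (1 << i)` equals (bit i of x) * 2^i, where bit i of x = x / 2^i % 2
theorem band_pow_eq (x : Int) (i : Nat) :
    PySem.Int.band x (2 ^ i) = (x / 2 ^ i % 2) * 2 ^ i := by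
  have hpi : (0:Int) < 2 ^ i := by positivity
  have hcast : ((2:Int) ^ i) = ((2 ^ i : Nat) : Int) := by push_cast; ring
  have h1 : ((2:Int) ^ i).toNat = 2 ^ i := by omega
  by_cases hx : 0 ≤ x
  · rw [PySem.Int.band_of_nonneg hx (by omega), h1, Nat.and_two_pow, Nat.testBit_eq_decide_div_mod_eq]
    have hx' : x = (x.toNat : Int) := by omega
    have hdiv : x / 2 ^ i = ((x.toNat / 2 ^ i : Nat) : Int) := by
      rw [hx', hcast, ← Int.natCast_div]; simp
    rcases Nat.mod_two_eq_zero_or_one (x.toNat / 2 ^ i) with h | h <;> rw [h] <;> norm_num <;>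
      omega
  · rw [PySem.Int.band_comm, PySem.Int.band, if_pos (by omega : (0:Int) ≤ 2 ^ i), if_neg hx,
      h1, Nat.and_comm, Nat.and_two_pow]
    set n : Nat := (-x - 1).toNat with hn
    have hxn : x = -(n : Int) - 1 := by omega
    have hdm : 2 ^ i * (n / 2 ^ i) + n % 2 ^ i = n := Nat.div_add_mod n (2 ^ i)
    have hrlt : n % 2 ^ i < 2 ^ i := Nat.mod_lt _ (by positivity)
    have hexp : ((n : Int)) = 2 ^ i * ((n / 2 ^ i : Nat) : Int) + ((n % 2 ^ i : Nat) : Int) := by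
      rw [hcast]; exact_mod_cast hdm.symm
    have hx2 : x = (2 ^ i - ((n % 2 ^ i : Nat) : Int) - 1) + 2 ^ i * (-((n / 2 ^ i : Nat) : Int) - 1) := by
      rw [hxn, hexp]; ring
    have hq : x / 2 ^ i = -((n / 2 ^ i : Nat) : Int) - 1 := by
      rw [hx2, Int.add_mul_ediv_left _ _ (by omega), Int.ediv_eq_zero_of_lt (by omega) (by omega)]
      ring
    rw [hq, Nat.testBit_eq_decide_div_mod_eq]
    rcases Nat.mod_two_eq_zero_or_one (n / 2 ^ i) with h | h <;> rw [h]
    · have hmod2 : ((n / 2 ^ i : Nat) : Int) % 2 = 0 := by exact_mod_cast congrArg (Nat.cast : Nat → Int) h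
      have : (-((n / 2 ^ i : Nat) : Int) - 1) % 2 = 1 := by omega
      rw [this]; norm_num
    · have hmod2 : ((n / 2 ^ i : Nat) : Int) % 2 = 1 := by exact_mod_cast congrArg (Nat.cast : Nat → Int) h
      have : (-((n / 2 ^ i : Nat) : Int) - 1) % 2 = 0 := by omega
      rw [this]; norm_num

-- A's extracted bit `(x & (1 << i)) >> i` is x / 2^i % 2
theorem cwbit_eq (x : Int) (i : Nat) :
    (PySem.Int.band x ((1 : Int) <<< i)) >>> i = x / 2 ^ i % 2 := by
  have h1 : ((1 : Int) <<< i) = 2 ^ i := by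
    rw [show ((1:Int) <<< i) = (((1 <<< i : Nat)) : Int) from rfl, Nat.one_shiftLeft]; push_cast; ring
  rw [h1, band_pow_eq]
  have hb : x / 2 ^ i % 2 = 0 ∨ x / 2 ^ i % 2 = 1 := by omega
  rcases hb with h | h <;> rw [h]
  · norm_num
  · norm_num
    rw [show ((2:Int) ^ i) = (((2 ^ i : Nat)) : Int) by push_cast; ring]
    rw [show ((2 ^ i : Nat) : Int) >>> i = (((2 ^ i : Nat) >>> i : Nat) : Int) by simp [Int.shiftRight_eq]]
    rw [Nat.shiftRight_eq_div_pow, Nat.div_self (by positivity)]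
    rfl

-- bits below k survive reduction mod 2^k
theorem bit_of_emod (x : Int) (k i : Nat) (h : i < k) :
    (x % 2 ^ k) / 2 ^ i % 2 = x / 2 ^ i % 2 := by
  have hsplit : (2:Int) ^ k = 2 ^ (k - i - 1) * 2 * 2 ^ i := by
    rw [← pow_succ, ← pow_add]
    congr 1
    omega
  have hdef : x % 2 ^ k = x + (-(2 ^ (k - i - 1) * (x / 2 ^ k)) * 2) * 2 ^ i := by
    rw [Int.emod_def]; rw [hsplit]; ring
  rw [hdef, Int.add_mul_ediv_right _ _ (by positivity : (0:Int) < 2 ^ i).ne']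
  omega

-- Nat.testBit as the Int bit expression, for nonnegative x
theorem testBit_toNat_eq (x : Int) (hx : 0 ≤ x) (i : Nat) :
    x.toNat.testBit i = decide (x / 2 ^ i % 2 = 1) := by
  rw [Nat.testBit_eq_decide_div_mod_eq]
  have hx' : x = (x.toNat : Int) := by omega
  have hdiv : x / 2 ^ i = ((x.toNat / 2 ^ i : Nat) : Int) := by
    rw [hx', show ((2:Int) ^ i) = ((2 ^ i : Nat) : Int) by push_cast; ring, ← Int.natCast_div]; simp
  rcases Nat.mod_two_eq_zero_or_one (x.toNat / 2 ^ i) with h | h <;>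
    simp [h] <;> omega

-- popcount of m < 2^k counts the set bits among the first k
theorem bitCount_eq_countP (k : Nat) : ∀ m : Nat, m < 2 ^ k →
    PySem.Int.bitCount (m : Int) = List.countP (fun i => m.testBit i) (List.range k) := by
  induction k with
  | zero =>
    intro m hm
    interval_cases m
    simp
  | succ k ih =>
    intro m hm
    by_cases h0 : m = 0
    · subst h0
      simp [Nat.zero_testBit]
    · rw [PySem.Int.bitCount_natCast (Nat.pos_of_ne_zero h0)]
      rw [ih (m / 2) (by omega)]
      rw [List.range_succ_eq_map, List.countP_cons, List.countP_map]
      have ht : ∀ i : Nat, m.testBit (Nat.succ i) = (m / 2).testBit i := fun i => Nat.testBit_succ m i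
      simp only [Function.comp_def, ht, Nat.testBit_zero]
      rcases Nat.mod_two_eq_zero_or_one m with h | h <;> (rw [h]; simp; try omega)

-- a fold with A's classify-and-increment step counts the three disjoint classes
theorem fold_classify {α : Type} (p q : α → Bool) (step : Int × Int × Int → α → Int × Int × Int)
    (hstep : ∀ acc x, step acc x =
      if p x then (acc.1 + 1, acc.2.1, acc.2.2)
      else if q x then (acc.1, acc.2.1 + 1, acc.2.2)
      else (acc.1, acc.2.1, acc.2.2 + 1))
    (l : List α) : ∀ a b c : Int,
    l.foldl step (a, b, c) =
      (a + (List.countP p l : Int), b + (List.countP (fun x => !(p x) && q x) l : Int),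
       c + (List.countP (fun x => !(p x) && !(q x)) l : Int)) := by
  induction l with
  | nil => intro a b c; simp
  | cons x xs ih =>
    intro a b c
    rw [List.foldl_cons, hstep, List.countP_cons, List.countP_cons, List.countP_cons]
    by_cases hp : p x
    · simp only [hp, if_true]
      rw [ih]
      simp [Prod.ext_iff]
      omega
    · by_cases hq : q x
      · simp only [hp, hq, if_true]
        rw [ih]
        simp [Prod.ext_iff]
        omega
      · simp only [hp, hq]
        rw [ih]
        simp [Prod.ext_iff]
        omega

-- two disjoint classifications and their complement partition the list
theorem countP_partition {α : Type} (p q : α → Bool) (l : List α)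
    (h : ∀ a ∈ l, ¬(p a = true ∧ q a = true)) :
    List.countP p l + List.countP q l + List.countP (fun a => !(p a) && !(q a)) l = l.length := by
  induction l with
  | nil => simp
  | cons x xs ih =>
    have hx := h x (by simp)
    have hxs := fun a ha => h a (List.mem_cons_of_mem x ha)
    rw [List.countP_cons, List.countP_cons, List.countP_cons, List.length_cons, ← ih hxs]
    by_cases hp : p x <;> by_cases hq : q x <;> simp [hp, hq] at hx ⊢ <;> omega

-- bit n of x (n < k) as a test on the masked nonnegative residue
theorem cwbit_testBit (x : Int) (k n : Nat) (hn : n < k) :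
    x / 2 ^ n % 2 = if (x % 2 ^ k).toNat.testBit n then 1 else 0 := by
  have hnn : 0 ≤ x % 2 ^ k := Int.emod_nonneg x (by positivity)
  rw [testBit_toNat_eq _ hnn, bit_of_emod x k n hn]
  have : x / 2 ^ n % 2 = 0 ∨ x / 2 ^ n % 2 = 1 := by omega
  rcases this with h | h <;> simp [h]

theorem main_eq (cw0 cw1 : Int) :
    analyze_transition cw0 cw1 = analyze_transition_alt cw0 cw1 := by
  have hM : ((1 : Int) <<< (21 : Nat)) - 1 = 2 ^ 21 - 1 := by decide
  have h21 : (0:Int) < 2 ^ 21 := by positivity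
  set t0 : Nat := (cw0 % 2 ^ 21).toNat with ht0
  set t1 : Nat := (cw1 % 2 ^ 21).toNat with ht1
  have ht0' : cw0 % 2 ^ 21 = (t0 : Int) := by
    have := Int.emod_nonneg cw0 h21.ne'; omega
  have ht1' : cw1 % 2 ^ 21 = (t1 : Int) := by
    have := Int.emod_nonneg cw1 h21.ne'; omega
  have ht0lt : t0 < 2 ^ 21 := by
    have := Int.emod_lt_of_pos cw0 h21
    have h2 : ((2:Int) ^ 21) = ((2 ^ 21 : Nat) : Int) := by norm_num
    omega
  have ht1lt : t1 < 2 ^ 21 := by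
    have := Int.emod_lt_of_pos cw1 h21
    have h2 : ((2:Int) ^ 21) = ((2 ^ 21 : Nat) : Int) := by norm_num
    omega
  -- canonical counts
  set S : Nat := List.countP (fun n => !t0.testBit n && t1.testBit n) (List.range 21) with hS
  set R : Nat := List.countP (fun n => t0.testBit n && !t1.testBit n) (List.range 21) with hR
  -- per-bit values of A's extracted bits (i ∈ range, cast to Int)
  have hbit0 : ∀ n : Nat, n < 21 →
      (PySem.Int.band cw0 ((1:Int) <<< ((n : Int)).toNat)) >>> ((n : Int)).toNat
        = if t0.testBit n then 1 else 0 := by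
    intro n hn
    rw [Int.toNat_natCast, cwbit_eq, cwbit_testBit cw0 21 n hn]
  have hbit1 : ∀ n : Nat, n < 21 →
      (PySem.Int.band cw1 ((1:Int) <<< ((n : Int)).toNat)) >>> ((n : Int)).toNat
        = if t1.testBit n then 1 else 0 := by
    intro n hn
    rw [Int.toNat_natCast, cwbit_eq, cwbit_testBit cw1 21 n hn]
    -- B side
  have hMn : ((2:Int) ^ 21 - 1) = ((2 ^ 21 - 1 : Nat) : Int) := by norm_num
  have hMtb : ∀ i : Nat, Nat.testBit (2 ^ 21 - 1) i = decide (i < 21) := fun i =>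
    Nat.testBit_two_pow_sub_one 21 i
  have hMtb' : ∀ i : Nat, Nat.testBit 2097151 i = decide (i < 21) := by
    intro i
    rw [show (2097151 : Nat) = 2 ^ 21 - 1 by norm_num]
    exact hMtb i
  have hx0 : PySem.Int.band cw0 (((1 : Int) <<< (21 : Nat)) - 1) = (t0 : Int) := by
    rw [hM, band_mask_eq_emod, ht0']
  have hx1 : PySem.Int.band cw1 (((1 : Int) <<< (21 : Nat)) - 1) = (t1 : Int) := by
    rw [hM, band_mask_eq_emod, ht1']
  have hs : PySem.Int.bitCount (PySem.Int.band (PySem.Int.bxor (PySem.Int.band cw0 (((1 : Int) <<< (21 : Nat)) - 1)) (((1 : Int) <<< (21 : Nat)) - 1)) (PySem.Int.band cw1 (((1 : Int) <<< (21 : Nat)) - 1))) = S := by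
    rw [hx0, hx1, hM, hMn, PySem.Int.bxor_natCast, PySem.Int.band_natCast]
    rw [bitCount_eq_countP 21 _ (Nat.lt_of_le_of_lt (Nat.and_le_right) ht1lt)]
    apply List.countP_congr
    intro n hn
    have hn21 : n < 21 := List.mem_range.mp hn
    simp [Nat.testBit_and, Nat.testBit_xor, hMtb', hn21]
  have hr : PySem.Int.bitCount (PySem.Int.band (PySem.Int.band cw0 (((1 : Int) <<< (21 : Nat)) - 1)) (PySem.Int.bxor (PySem.Int.band cw1 (((1 : Int) <<< (21 : Nat)) - 1)) (((1 : Int) <<< (21 : Nat)) - 1))) = R := by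
    rw [hx0, hx1, hM, hMn, PySem.Int.bxor_natCast, PySem.Int.band_natCast]
    rw [bitCount_eq_countP 21 _ (Nat.lt_of_le_of_lt (Nat.and_le_left) ht0lt)]
    apply List.countP_congr
    intro n hn
    have hn21 : n < 21 := List.mem_range.mp hn
    simp [Nat.testBit_and, Nat.testBit_xor, hMtb', hn21]
  have hB : analyze_transition_alt cw0 cw1 =
      [("set_transitions", (S : Int)), ("reset_transitions", (R : Int)),
       ("redundant_ops", 21 - (S : Int) - (R : Int)), ("total_bits", 21)] := by
    simp only [analyze_transition_alt]
    rw [hs, hr]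
  -- A side
  have hrange : PySem.List.pyRange 0 21 1 = (List.range 21).map (fun k : Nat => (k : Int)) := by
    exact_mod_cast PySem.List.pyRange_zero_natCast 21
  have hstep : ∀ (acc : Int × Int × Int) (x : Int), stepA cw0 cw1 acc x =
      if (fun i : Int => decide ((PySem.Int.band cw0 ((1:Int) <<< i.toNat)) >>> i.toNat = 0 ∧ (PySem.Int.band cw1 ((1:Int) <<< i.toNat)) >>> i.toNat = 1)) x
      then (acc.1 + 1, acc.2.1, acc.2.2)
      else if (fun i : Int => decide ((PySem.Int.band cw0 ((1:Int) <<< i.toNat)) >>> i.toNat = 1 ∧ (PySem.Int.band cw1 ((1:Int) <<< i.toNat)) >>> i.toNat = 0)) x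
      then (acc.1, acc.2.1 + 1, acc.2.2)
      else (acc.1, acc.2.1, acc.2.2 + 1) := by
    intro acc x
    simp only [stepA, decide_eq_true_eq]
  have hfold := fold_classify
    (fun i : Int => decide ((PySem.Int.band cw0 ((1:Int) <<< i.toNat)) >>> i.toNat = 0 ∧ (PySem.Int.band cw1 ((1:Int) <<< i.toNat)) >>> i.toNat = 1))
    (fun i : Int => decide ((PySem.Int.band cw0 ((1:Int) <<< i.toNat)) >>> i.toNat = 1 ∧ (PySem.Int.band cw1 ((1:Int) <<< i.toNat)) >>> i.toNat = 0))
    (stepA cw0 cw1) hstep ((List.range 21).map (fun k : Nat => (k : Int))) 0 0 0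
  -- translate the three counts
  have hc1 : List.countP ((fun i : Int => decide ((PySem.Int.band cw0 ((1:Int) <<< i.toNat)) >>> i.toNat = 0 ∧ (PySem.Int.band cw1 ((1:Int) <<< i.toNat)) >>> i.toNat = 1))) ((List.range 21).map (fun k : Nat => (k : Int))) = S := by
    rw [List.countP_map]
    apply List.countP_congr
    intro n hn
    have hn21 : n < 21 := List.mem_range.mp hn
    simp only [Function.comp_def, hbit0 n hn21, hbit1 n hn21]
    cases h0 : t0.testBit n <;> cases h1 : t1.testBit n <;> simp
  have hc2 : List.countP (fun x => !((fun i : Int => decide ((PySem.Int.band cw0 ((1:Int) <<< i.toNat)) >>> i.toNat = 0 ∧ (PySem.Int.band cw1 ((1:Int) <<< i.toNat)) >>> i.toNat = 1)) x) && ((fun i : Int => decide ((PySem.Int.band cw0 ((1:Int) <<< i.toNat)) >>> i.toNat = 1 ∧ (PySem.Int.band cw1 ((1:Int) <<< i.toNat)) >>> i.toNat = 0)) x)) ((List.range 21).map (fun k : Nat => (k : Int))) = R := by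
    rw [List.countP_map]
    apply List.countP_congr
    intro n hn
    have hn21 : n < 21 := List.mem_range.mp hn
    simp only [Function.comp_def, hbit0 n hn21, hbit1 n hn21]
    cases h0 : t0.testBit n <;> cases h1 : t1.testBit n <;> simp
  have hc3 : List.countP (fun x => !((fun i : Int => decide ((PySem.Int.band cw0 ((1:Int) <<< i.toNat)) >>> i.toNat = 0 ∧ (PySem.Int.band cw1 ((1:Int) <<< i.toNat)) >>> i.toNat = 1)) x) && !((fun i : Int => decide ((PySem.Int.band cw0 ((1:Int) <<< i.toNat)) >>> i.toNat = 1 ∧ (PySem.Int.band cw1 ((1:Int) <<< i.toNat)) >>> i.toNat = 0)) x)) ((List.range 21).map (fun k : Nat => (k : Int))) =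
      List.countP (fun n => !(!t0.testBit n && t1.testBit n) && !(t0.testBit n && !t1.testBit n)) (List.range 21) := by
    rw [List.countP_map]
    apply List.countP_congr
    intro n hn
    have hn21 : n < 21 := List.mem_range.mp hn
    simp only [Function.comp_def, hbit0 n hn21, hbit1 n hn21]
    cases h0 : t0.testBit n <;> cases h1 : t1.testBit n <;> simp
  have hpart := countP_partition (fun n => !t0.testBit n && t1.testBit n)
    (fun n => t0.testBit n && !t1.testBit n) (List.range 21)
    (by intro a _ h; cases ht : t0.testBit a <;> cases ht' : t1.testBit a <;> simp [ht, ht'] at h)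
  have hA : analyze_transition cw0 cw1 =
      [("set_transitions", (S : Int)), ("reset_transitions", (R : Int)),
       ("redundant_ops", 21 - (S : Int) - (R : Int)), ("total_bits", 21)] := by
    simp only [analyze_transition, hrange]
    rw [hfold]
    rw [hc1, hc2, hc3]
    simp only [List.cons.injEq, Prod.mk.injEq]
    have hlen2 : (List.range 21).length = 21 := List.length_range
    refine ⟨⟨trivial, by omega⟩, ⟨trivial, by omega⟩, ⟨trivial, by beta_reduce at hpart; rw [← hS, ← hR] at hpart; omega⟩, trivial⟩
  rw [hA, hB]

-- ===== VERDICT (by name: the statement is the Claim_ definition above) =====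
theorem analyze_transition_spec : Claim_equal_analyze_transition := by
  intro cw0 cw1 _
  exact main_eq cw0 cw1
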